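-- pv_equiv track=rewrite | github.com/StarmannRassy/alx-interview | 0x02-minimum_operations/0-minoperations.py | minOperations
-- ===== SOURCE A (Python) =====
-- def minOperations(n):
--     """
--     Calculates the fewest number of operations needed to result in exactly n H characters in the file.
--     Returns an integer representing the minimum number of operations.
--     If n is impossible to achieve, returns 0.
--     """
--     if n == 1:
--         return 0  # No operations needed for n=1
--
--     dp = [0] * (n + 1)  # Initialize the array to store minimum operations
--
--     for i in range(2, n + 1):
--         dp[i] = i  # Initialize with a default value
--         for j in range(2, i):
--             if i % j == 0:
--                 dp[i] = dp[j] + (i // j)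
--                 break
--
--     return dp[n]
-- ===== SOURCE B (Python) =====
-- def minOperations(n):
--     if n <= 1:
--         return 0
--     j = 2
--     while j * j <= n:
--         if n % j == 0:
--             return j + n // j
--         j += 1
--     return n
-- ===== Notes on version B (the rewrite author's own statement) =====
-- stated objective: faster
-- what changed: Replaces the O(n^2) dp table (for each i in 2..n scan 2..i for the first divisor) by a single trial-division scan up to sqrt(n) that directly returns spf + n//spf (A's dp[n] always equals that), with no table and no outer loop.
import Mathlib
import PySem

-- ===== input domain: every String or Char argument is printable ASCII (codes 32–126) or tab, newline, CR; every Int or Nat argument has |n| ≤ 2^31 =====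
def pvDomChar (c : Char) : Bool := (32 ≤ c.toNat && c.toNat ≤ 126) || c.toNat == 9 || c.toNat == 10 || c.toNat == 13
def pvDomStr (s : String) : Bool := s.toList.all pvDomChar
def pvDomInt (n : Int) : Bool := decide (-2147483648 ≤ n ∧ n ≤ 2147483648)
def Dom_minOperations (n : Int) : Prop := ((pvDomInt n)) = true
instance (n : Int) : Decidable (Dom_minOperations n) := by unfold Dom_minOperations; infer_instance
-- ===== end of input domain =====

-- B replaces A's O(n^2) dp table by a single trial-division scan up to sqrt(n) (faster).
-- A raises IndexError on negative n (excluded by Pre_); B returns zero there.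

-- ===== PORT A =====
-- body of A's outer loop: dp[i] = i; then scan j in range(2, i) for the first divisor
-- (the 'break' is ported as find?), setting dp[i] = dp[j] + i // j if one is found.
-- All values are nonnegative under Pre_, so the table is kept in Nat and cast at the end.
def stepA (dp : List Nat) (i : Nat) : List Nat :=
  let dp := dp.set i i
  match (List.range' 2 (i - 2)).find? (fun j => i % j == 0) with
  | some j => dp.set i (dp.getD j 0 + i / j)
  | none => dp

def minOperations (n : Int) : Int :=
  if n == 1 then 0
  else
    let N := n.toNat
    let dp := (List.range' 2 (N + 1 - 2)).foldl stepA (List.replicate (N + 1) 0)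
    ((dp.getD N 0 : Nat) : Int)

-- ===== PORT B =====
-- B's while loop: scan j = 2, 3, ... while j*j <= n for the first divisor of n.
def altLoop (m : Nat) (j : Nat) : Nat :=
  if h : j * j ≤ m then
    if m % j = 0 then j + m / j else altLoop m (j + 1)
  else m
termination_by m + 1 - j
decreasing_by
  have hj : j ≤ m := by
    rcases Nat.eq_zero_or_pos j with h0 | h1
    · omega
    · exact le_trans (Nat.le_mul_of_pos_left j h1) h
  omega

def minOperations_alt (n : Int) : Int :=
  if n ≤ 1 then 0 else (altLoop n.toNat 2 : Int)

-- ===== PRECONDITION & SPEC =====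
-- Pre_ excludes negative n, where A raises IndexError (dp[n] indexes an empty list).
def Pre_minOperations (n : Int) : Prop := 0 ≤ n
instance (n : Int) : Decidable (Pre_minOperations n) := by unfold Pre_minOperations; infer_instance
def pvWitness_minOperations : Int := 12

def Spec_minOperations (n : Int) (out : Int) : Prop := out = minOperations_alt n
instance (n : Int) (out : Int) : Decidable (Spec_minOperations n out) := by unfold Spec_minOperations; infer_instance

-- ===== CLAIM (what is proved, stated in full; the proofs are below) =====
def Claim_equal_minOperations : Prop := ∀ (n : Int), Dom_minOperations n → Pre_minOperations n → Spec_minOperations n (minOperations n)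

-- ===== LEMMAS AND PROOFS =====

-- the first divisor of m in range(2, m), as both programs search for it
def mindiv (m : Nat) : Option Nat := (List.range' 2 (m - 2)).find? (fun j => m % j == 0)

-- the common value both programs compute for m ≥ 2
def fA (m : Nat) : Nat := match mindiv m with | some j => j + m / j | none => m

lemma find?_range'_iff (p : Nat → Bool) (a len j : Nat) :
    (List.range' a len).find? p = some j ↔
      a ≤ j ∧ j < a + len ∧ p j = true ∧ ∀ k, a ≤ k → k < j → p k = false := by
  induction len generalizing a with
  | zero => simp [List.range']; omega
  | succ L ih =>
    rw [List.range'_succ, List.find?_cons]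
    cases hpa : p a with
    | true =>
      simp only [Option.some.injEq]
      constructor
      · rintro rfl; exact ⟨le_refl _, by omega, hpa, by omega⟩
      · rintro ⟨h1, _, _, h4⟩
        by_contra hne
        have haj : a < j := by omega
        have := h4 a (le_refl _) haj
        simp [hpa] at this
    | false =>
      rw [ih]
      constructor
      · rintro ⟨h1, h2, h3, h4⟩
        refine ⟨by omega, by omega, h3, fun k hk1 hk2 => ?_⟩
        rcases Nat.eq_or_lt_of_le hk1 with rfl | h
        · exact hpa
        · exact h4 k h hk2
      · rintro ⟨h1, h2, h3, h4⟩
        have haj : a ≠ j := by rintro rfl; rw [hpa] at h3; exact absurd h3 (by simp)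
        exact ⟨by omega, by omega, h3, fun k hk1 hk2 => h4 k (by omega) hk2⟩

lemma mindiv_some {m j : Nat} (h : mindiv m = some j) :
    2 ≤ j ∧ j < m ∧ m % j = 0 ∧ ∀ k, 2 ≤ k → k < j → m % k ≠ 0 := by
  unfold mindiv at h
  rw [find?_range'_iff] at h
  obtain ⟨h1, h2, h3, h4⟩ := h
  have hm : 2 ≤ m := by omega
  refine ⟨h1, by omega, by simpa using h3, fun k hk1 hk2 => ?_⟩
  have := h4 k hk1 hk2
  simpa using this

lemma mindiv_none {m : Nat} (h : mindiv m = none) :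
    ∀ k, 2 ≤ k → k < m → m % k ≠ 0 := by
  intro k hk1 hk2 hdvd
  unfold mindiv at h
  rw [List.find?_eq_none] at h
  have hk : k ∈ List.range' 2 (m - 2) := by
    rw [List.mem_range'_1]
    exact ⟨by omega, by omega⟩
  have := h k hk
  simp [hdvd] at this

lemma mindiv_prime {m j : Nat} (h : mindiv m = some j) : mindiv j = none := by
  obtain ⟨hj2, hjm, hdvd, hmin⟩ := mindiv_some h
  cases hd : mindiv j with
  | none => rfl
  | some d =>
    obtain ⟨hd2, hdj, hdd, _⟩ := mindiv_some hd
    exfalso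
    have h1 : d ∣ j := Nat.dvd_of_mod_eq_zero hdd
    have h2 : j ∣ m := Nat.dvd_of_mod_eq_zero hdvd
    have : m % d = 0 := Nat.mod_eq_zero_of_dvd (h1.trans h2)
    exact hmin d hd2 (by omega) this

lemma fA_of_mindiv_none {m : Nat} (h : mindiv m = none) : fA m = m := by
  unfold fA; rw [h]

lemma mindiv_sq {m j : Nat} (h : mindiv m = some j) : j * j ≤ m := by
  obtain ⟨hj2, hjm, hdvd, hmin⟩ := mindiv_some h
  have hjd : j ∣ m := Nat.dvd_of_mod_eq_zero hdvd
  set q := m / j with hq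
  have hmq : j * q = m := Nat.mul_div_cancel' hjd
  have hm2 : 2 ≤ m := by omega
  have hq2 : 2 ≤ q := by
    rcases Nat.lt_or_ge q 2 with hlt | hge
    · interval_cases q <;> omega
    · exact hge
  have hqm : q < m := by
    have : q ≤ m / 2 := by
      rw [hq]
      exact Nat.div_le_div_left hj2 (by omega)
    omega
  have hqd : q ∣ m := ⟨j, by rw [← hmq, Nat.mul_comm]⟩
  have hjq : j ≤ q := by
    by_contra hgt
    rw [Nat.not_le] at hgt
    exact hmin q hq2 hgt (Nat.mod_eq_zero_of_dvd hqd)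
  calc j * j ≤ j * q := Nat.mul_le_mul_left j hjq
    _ = m := hmq

lemma altLoop_eq_none {m : Nat} (hm : ∀ k, 2 ≤ k → k < m → m % k ≠ 0) :
    ∀ a, 2 ≤ a → altLoop m a = m := by
  intro a
  induction a using altLoop.induct m with
  | case1 x hsq hdvd =>
    intro hx2
    exfalso
    have h2x : 2 * x ≤ x * x := Nat.mul_le_mul_right x hx2
    exact hm x hx2 (by omega) hdvd
  | case2 x hsq hnd ih =>
    intro hx2
    rw [altLoop, dif_pos hsq, if_neg hnd]
    exact ih (by omega)
  | case3 x hns =>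
    intro _
    rw [altLoop, dif_neg hns]

lemma altLoop_eq_some {m j : Nat} (hj2 : 2 ≤ j) (hsq : j * j ≤ m) (hdvd : m % j = 0)
    (hmin : ∀ k, 2 ≤ k → k < j → m % k ≠ 0) :
    ∀ a, 2 ≤ a → a ≤ j → altLoop m a = j + m / j := by
  intro a
  induction a using altLoop.induct m with
  | case1 x hxsq hxdvd =>
    intro hx2 hxj
    have hxeq : x = j := by
      rcases Nat.lt_or_ge x j with h | h
      · exact absurd hxdvd (hmin x hx2 h)
      · omega
    subst hxeq
    rw [altLoop, dif_pos hxsq, if_pos hxdvd]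
  | case2 x hxsq hnd ih =>
    intro hx2 hxj
    have hxne : x ≠ j := by rintro rfl; exact hnd hdvd
    rw [altLoop, dif_pos hxsq, if_neg hnd]
    exact ih (by omega) (by omega)
  | case3 x hns =>
    intro hx2 hxj
    exact absurd (le_trans (Nat.mul_le_mul hxj hxj) hsq) hns

lemma dp_invariant (N : Nat) (hN : 2 ≤ N) :
    ∀ t, t ≤ N - 1 →
      (((List.range' 2 t).foldl stepA (List.replicate (N + 1) 0)).length = N + 1 ∧
       ∀ k, 2 ≤ k → k < 2 + t →
         ((List.range' 2 t).foldl stepA (List.replicate (N + 1) 0)).getD k 0 = fA k) := by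
  intro t
  induction t with
  | zero =>
    intro _
    constructor
    · simp
    · intro k hk1 hk2; omega
  | succ t ih =>
    intro ht
    obtain ⟨hlen, hinv⟩ := ih (by omega)
    set dp := (List.range' 2 t).foldl stepA (List.replicate (N + 1) 0) with hdp
    have hiN : 2 + t ≤ N := by omega
    rw [List.range'_concat, List.foldl_append, List.foldl_cons, List.foldl_nil]
    rw [← hdp]
    have hstep : stepA dp (2 + 1 * t) = stepA dp (2 + t) := by norm_num
    rw [hstep]
    have hlen1 : (dp.set (2 + t) (2 + t)).length = N + 1 := by rw [List.length_set, hlen]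
    have hget1 : ∀ k, k ≠ 2 + t → (dp.set (2 + t) (2 + t)).getD k 0 = dp.getD k 0 := by
      intro k hk
      simp [List.getD_eq_getElem?_getD, List.getElem?_set_ne (fun h => hk h.symm)]
    have hltdp : 2 + t < dp.length := by omega
    have hget2 : (dp.set (2 + t) (2 + t)).getD (2 + t) 0 = 2 + t := by
      rw [List.getD_eq_getElem?_getD, List.getElem?_set_self hltdp]; rfl
    cases hmd : mindiv (2 + t) with
    | none =>
      have hsa : stepA dp (2 + t) = dp.set (2 + t) (2 + t) := by
        unfold stepA
        rw [show (List.range' 2 (2 + t - 2)).find? (fun j => (2 + t) % j == 0) = none from hmd]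
      rw [hsa]
      refine ⟨hlen1, fun k hk1 hk2 => ?_⟩
      rcases Nat.lt_or_ge k (2 + t) with hkl | hkg
      · rw [hget1 k (by omega)]
        exact hinv k hk1 hkl
      · have hke : k = 2 + t := by omega
        subst hke
        rw [hget2, fA_of_mindiv_none hmd]
    | some j =>
      obtain ⟨hj2, hji, hjdvd, hjmin⟩ := mindiv_some hmd
      have hsa : stepA dp (2 + t) =
          (dp.set (2 + t) (2 + t)).set (2 + t)
            ((dp.set (2 + t) (2 + t)).getD j 0 + (2 + t) / j) := by
        unfold stepA
        rw [show (List.range' 2 (2 + t - 2)).find? (fun j => (2 + t) % j == 0) = some j from hmd]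
      rw [hsa]
      have hgj : (dp.set (2 + t) (2 + t)).getD j 0 = j := by
        rw [hget1 j (by omega)]
        rw [hinv j hj2 (by omega), fA_of_mindiv_none (mindiv_prime hmd)]
      rw [hgj]
      refine ⟨by rw [List.length_set, hlen1], fun k hk1 hk2 => ?_⟩
      rcases Nat.lt_or_ge k (2 + t) with hkl | hkg
      · have : ((dp.set (2 + t) (2 + t)).set (2 + t) (j + (2 + t) / j)).getD k 0 = dp.getD k 0 := by
          simp [List.getD_eq_getElem?_getD, List.getElem?_set_ne (show 2 + t ≠ k by omega)]
        rw [this]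
        exact hinv k hk1 hkl
      · have hke : k = 2 + t := by omega
        subst hke
        have hlt1 : 2 + t < (dp.set (2 + t) (2 + t)).length := by omega
        have : ((dp.set (2 + t) (2 + t)).set (2 + t) (j + (2 + t) / j)).getD (2 + t) 0 = j + (2 + t) / j := by
          rw [List.getD_eq_getElem?_getD, List.getElem?_set_self hlt1]; rfl
        rw [this]
        unfold fA
        rw [hmd]

lemma main_eq (N : Nat) (hN : 2 ≤ N) :
    ((List.range' 2 (N + 1 - 2)).foldl stepA (List.replicate (N + 1) 0)).getD N 0 = altLoop N 2 := by
  have h1 : N + 1 - 2 = N - 1 := by omega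
  rw [h1]
  have := (dp_invariant N hN (N - 1) (le_refl _)).2 N hN (by omega)
  rw [this]
  cases hmd : mindiv N with
  | none =>
    rw [fA_of_mindiv_none hmd, altLoop_eq_none (mindiv_none hmd) 2 (by norm_num)]
  | some j =>
    obtain ⟨hj2, hjN, hjdvd, hjmin⟩ := mindiv_some hmd
    rw [altLoop_eq_some hj2 (mindiv_sq hmd) hjdvd hjmin 2 (le_refl _) hj2]
    unfold fA
    rw [hmd]

theorem minOperations_spec : Claim_equal_minOperations := by
  intro n _ hpre
  unfold Spec_minOperations
  unfold Pre_minOperations at hpre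
  have h3 : n = 0 ∨ n = 1 ∨ 2 ≤ n := by omega
  rcases h3 with rfl | rfl | h2
  · decide
  · decide
  · have hne1 : (n == 1) = false := by simp; omega
    have hle1 : ¬ (n ≤ 1) := by omega
    rw [minOperations, minOperations_alt, if_neg (by simp; omega), if_neg hle1]
    have hN : 2 ≤ n.toNat := by omega
    show ((((List.range' 2 (n.toNat + 1 - 2)).foldl stepA (List.replicate (n.toNat + 1) 0)).getD n.toNat 0 : Nat) : Int) = (altLoop n.toNat 2 : Int)
    exact_mod_cast main_eq n.toNat hN
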